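-- pv_equiv track=rewrite | github.com/darthsuogles/phissenschaft | algo/meeting_rooms_ii.py | find_min_rooms_end_delta
-- ===== SOURCE A (Python) =====
-- def find_min_rooms_end_delta(meetings):
--     n = len(meetings)
--     if 0 == n: return 0
--     start_times = []
--     end_times = []
--     for intv in meetings:
--         start_times.append(intv[0])
--         end_times.append(intv[1])
--
--     start_times = sorted(start_times)
--     end_times = sorted(end_times)
--
--     num_rooms = 0
--     last_end_idx = 0
--     for start_time in start_times:
--         end_time = end_times[last_end_idx]
--         if start_time < end_time:
--             # All the `start_time` here represent meetings
--             # started when this current meeting haven't finished.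
--             # The existing overlapping meetings are already taken
--             # care of by the previous ending interval.
--             # These new ones are meetings started after the
--             # previous `end_time`. Thus we are not over counting.
--             # Each meeting's previous and current conflicting meetings
--             # are counted, thus we are not under counting, either.
--             num_rooms += 1
--         else:
--             last_end_idx += 1
--
--     return num_rooms
-- ===== SOURCE B (Python) =====
-- def find_min_rooms_end_delta(meetings):
--     events = []
--     for s, e in meetings:
--         events.append((s, 1))
--         events.append((e, -1))
--     events.sort(key=lambda ev: ev[1])  # ends (-1) before starts (+1) on equal times ...
--     events.sort(key=lambda ev: ev[0])  # ... kept by this stable sort on times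
--     best = 0
--     cur = 0
--     for _, d in events:
--         cur += d
--         if best < cur:
--             best = cur
--     return best
-- ===== Notes on version B (the rewrite author's own statement) =====
-- stated objective: idiomatic
-- what changed: Replaces A's two parallel sorted lists (starts/ends) with moving end-pointer by the standard event-sweep: build (time, +1/-1) events, sort them with ends before starts at equal times, and take the running maximum of a single +1/-1 counter.
import Mathlib
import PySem

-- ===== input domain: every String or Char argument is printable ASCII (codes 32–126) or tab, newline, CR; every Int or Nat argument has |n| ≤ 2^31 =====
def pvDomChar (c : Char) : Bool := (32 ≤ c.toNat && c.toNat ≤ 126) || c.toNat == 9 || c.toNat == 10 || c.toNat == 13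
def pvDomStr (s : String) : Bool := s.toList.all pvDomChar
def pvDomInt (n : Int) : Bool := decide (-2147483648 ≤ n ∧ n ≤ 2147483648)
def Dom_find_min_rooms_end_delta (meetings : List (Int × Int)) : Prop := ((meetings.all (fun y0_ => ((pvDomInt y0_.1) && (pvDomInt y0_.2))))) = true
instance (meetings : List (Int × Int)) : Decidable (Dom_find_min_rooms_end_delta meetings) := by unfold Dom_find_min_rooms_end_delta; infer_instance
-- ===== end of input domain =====

-- B replaces A's two sorted lists (starts/ends) with advancing end pointer by the standard
-- event sweep: (time, ±1) events sorted with ends before starts at ties, running-max counter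
-- (objective: idiomatic; same O(n log n) cost).

-- ===== PORT A =====
-- A's for-loop over start_times with state (num_rooms, last_end_idx).
-- end_times[last_end_idx]: on A's reachable states the index is in range
-- (last_end_idx ≤ starts processed < n), so pyGetD's default 0 is never observed.
def aLoop (end_times : List Int) : List Int → Int → Int → Int
  | [], num_rooms, _ => num_rooms
  | start_time :: rest, num_rooms, last_end_idx =>
      let end_time := PySem.List.pyGetD end_times last_end_idx 0
      if start_time < end_time then aLoop end_times rest (num_rooms + 1) last_end_idx
      else aLoop end_times rest num_rooms (last_end_idx + 1)

def find_min_rooms_end_delta (meetings : List (Int × Int)) : Int :=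
  let n := meetings.length
  if 0 = n then 0
  else
    let start_times := meetings.foldl (fun acc intv => acc ++ [intv.1]) ([] : List Int)
    let end_times := meetings.foldl (fun acc intv => acc ++ [intv.2]) ([] : List Int)
    let start_times := PySem.List.sorted start_times (fun x => x) false
    let end_times := PySem.List.sorted end_times (fun x => x) false
    aLoop end_times start_times 0 0

-- ===== PORT B =====
-- 'for _, d in events: cur += d; best = max(best, cur)'
def bSweep : List (Int × Int) → Int → Int → Int
  | [], best, _ => best
  | (_, d) :: rest, best, cur =>
      let cur := cur + d
      bSweep rest (if best < cur then cur else best) cur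

def find_min_rooms_end_delta_alt (meetings : List (Int × Int)) : Int :=
  let events := meetings.foldl (fun acc p => acc ++ [(p.1, 1), (p.2, -1)]) ([] : List (Int × Int))
  let events := PySem.List.sorted events (fun ev => ev.2) false
  let events := PySem.List.sorted events (fun ev => ev.1) false
  bSweep events 0 0

-- ===== PRECONDITION & SPEC =====
def Spec_find_min_rooms_end_delta (meetings : List (Int × Int)) (out : Int) : Prop := out = find_min_rooms_end_delta_alt meetings
instance (meetings : List (Int × Int)) (out : Int) : Decidable (Spec_find_min_rooms_end_delta meetings out) := by unfold Spec_find_min_rooms_end_delta; infer_instance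

-- ===== CLAIM (what is proved, stated in full; the proofs are below) =====
def Claim_equal_find_min_rooms_end_delta : Prop := ∀ (meetings : List (Int × Int)), Dom_find_min_rooms_end_delta meetings → Spec_find_min_rooms_end_delta meetings (find_min_rooms_end_delta meetings)

-- ===== LEMMAS AND PROOFS =====

-- how many list elements are ≤ t
def cI (E : List Int) (t : Int) : Int := (E.countP (fun x => decide (x ≤ t)) : Int)

-- the common reference value: for each meeting's start t, (# starts ≤ t) − (# ends ≤ t); answer = max of those and 0
def fB (meetings : List (Int × Int)) (t : Int) : Int :=
  cI (meetings.map (fun m => m.1)) t - cI (meetings.map (fun m => m.2)) t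

def MB (meetings : List (Int × Int)) : Int :=
  List.foldl max 0 (meetings.map (fun m => fB meetings m.1))

-- the raw event list B builds
def evOf (meetings : List (Int × Int)) : List (Int × Int) :=
  meetings.flatMap (fun m => [(m.1, 1), (m.2, -1)])

-- B's sort order: by time, ends (-1) before starts (+1) at equal times
def lexle (a b : Int × Int) : Prop := a.1 < b.1 ∨ (a.1 = b.1 ∧ a.2 ≤ b.2)

-- counts over an event list
def gg (X : List (Int × Int)) (t : Int) : Int :=
  (X.countP (fun ev => ev.2 == 1 && decide (ev.1 ≤ t)) : Int)
    - (X.countP (fun ev => ev.2 == -1 && decide (ev.1 ≤ t)) : Int)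

def sumd (X : List (Int × Int)) : Int :=
  (X.countP (fun ev => ev.2 == 1) : Int) - (X.countP (fun ev => ev.2 == -1) : Int)

def ent (X : List (Int × Int)) : List Int :=
  (X.filter (fun ev => ev.2 == 1)).map (fun ev => gg X ev.1)

def sstep (s : Int × Int) (ev : Int × Int) : Int × Int := (max s.1 (s.2 + ev.2), s.2 + ev.2)

lemma bSweep_eq_foldl : ∀ (l : List (Int × Int)) (b c : Int),
    bSweep l b c = (l.foldl sstep (b, c)).1 := by
  intro l
  induction l with
  | nil => intro b c; rfl
  | cons hd tl ih =>
      intro b c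
      obtain ⟨t, d⟩ := hd
      have hmax : (if b < c + d then c + d else b) = max b (c + d) := by omega
      simp only [bSweep, List.foldl_cons, sstep]
      rw [hmax, ih]

lemma insertBy_lexle (x : Int × Int) : ∀ (acc : List (Int × Int)),
    acc.Pairwise lexle → (∀ y ∈ acc, y.2 ≤ x.2) →
    (PySem.List.insertBy (fun a b => decide (a.1 < b.1)) x acc).Pairwise lexle := by
  intro acc
  induction acc with
  | nil => intro _ _; rw [PySem.List.insertBy.eq_def]; simp
  | cons y ys ih =>
      intro hp hle
      obtain ⟨hy, hys⟩ := List.pairwise_cons.mp hp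
      rw [PySem.List.insertBy.eq_def]
      by_cases hxy : x.1 < y.1
      · simp only [hxy, decide_true, if_pos]
        rw [List.pairwise_cons]
        refine ⟨?_, hp⟩
        intro z hz
        rcases List.mem_cons.mp hz with rfl | hz2
        · exact Or.inl hxy
        · have hyz := hy z hz2
          unfold lexle at hyz ⊢
          omega
      · simp only [hxy, decide_false, Bool.false_eq_true, if_neg, not_false_eq_true]
        rw [List.pairwise_cons]
        constructor
        · intro z hz
          rcases (PySem.List.mem_insertBy _ _ _ _).mp hz with heq | hz2
          · subst heq
            have h2 := hle y (by simp)
            unfold lexle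
            omega
          · exact hy z hz2
        · exact ih hys (fun z hz => hle z (by simp [hz]))

lemma foldl_insertBy_lexle : ∀ (X acc : List (Int × Int)),
    X.Pairwise (fun a b => a.2 ≤ b.2) → acc.Pairwise lexle →
    (∀ x ∈ X, ∀ y ∈ acc, y.2 ≤ x.2) →
    (X.foldl (fun acc x => PySem.List.insertBy (fun a b => decide (a.1 < b.1)) x acc) acc).Pairwise lexle := by
  intro X
  induction X with
  | nil => intro acc _ h _; simpa using h
  | cons x X ih =>
      intro acc hX hacc hord
      obtain ⟨hx, hXt⟩ := List.pairwise_cons.mp hX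
      simp only [List.foldl_cons]
      refine ih _ hXt (insertBy_lexle x acc hacc (fun y hy => hord x (by simp) y hy)) ?_
      intro x' hx' y hy
      rcases (PySem.List.mem_insertBy _ _ _ _).mp hy with rfl | hy2
      · exact hx x' hx'
      · exact hord x' (by simp [hx']) y hy2

lemma gg_append (X : List (Int × Int)) (e : Int × Int) (u : Int) :
    gg (X ++ [e]) u
      = gg X u + (if e.2 = 1 ∧ e.1 ≤ u then 1 else 0) - (if e.2 = -1 ∧ e.1 ≤ u then 1 else 0) := by
  obtain ⟨a, d⟩ := e
  unfold gg
  simp only [List.countP_append, List.countP_singleton]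
  by_cases h1 : d = 1 <;> by_cases h3 : d = -1 <;> by_cases h2 : a ≤ u <;>
    simp [h1, h2, h3] <;> push_cast <;> omega

lemma gg_append_start (X : List (Int × Int)) (t u : Int) :
    gg (X ++ [(t, 1)]) u = gg X u + (if t ≤ u then 1 else 0) := by
  rw [gg_append]
  norm_num

lemma gg_append_end (X : List (Int × Int)) (t u : Int) :
    gg (X ++ [(t, -1)]) u = gg X u - (if t ≤ u then 1 else 0) := by
  rw [gg_append]
  norm_num

lemma sumd_append (X : List (Int × Int)) (e : Int × Int) :
    sumd (X ++ [e]) = sumd X + (if e.2 = 1 then 1 else 0) - (if e.2 = -1 then 1 else 0) := by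
  obtain ⟨a, d⟩ := e
  unfold sumd
  simp only [List.countP_append, List.countP_singleton]
  by_cases h1 : d = 1 <;> by_cases h3 : d = -1 <;>
    simp [h1, h3] <;> push_cast <;> omega

lemma gg_all_le (X : List (Int × Int)) (t : Int) (h : ∀ p ∈ X, p.1 ≤ t) : gg X t = sumd X := by
  unfold gg sumd
  have h1 : X.countP (fun ev => ev.2 == 1 && decide (ev.1 ≤ t)) = X.countP (fun ev => ev.2 == 1) :=
    List.countP_congr (fun ev hev => by simp [h ev hev])
  have h2 : X.countP (fun ev => ev.2 == -1 && decide (ev.1 ≤ t)) = X.countP (fun ev => ev.2 == -1) :=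
    List.countP_congr (fun ev hev => by simp [h ev hev])
  rw [h1, h2]

lemma ent_mem_le (X : List (Int × Int)) {x : Int} (hx : x ∈ ent X) :
    x ≤ List.foldl max 0 (ent X) :=
  (PySem.List.le_foldl_max (ent X) 0).2 x hx

lemma sweep_invariant : ∀ (Ev : List (Int × Int)), Ev.Pairwise lexle →
    (∀ ev ∈ Ev, ev.2 = 1 ∨ ev.2 = -1) →
    Ev.foldl sstep (0, 0) = (List.foldl max 0 (ent Ev), sumd Ev)
      ∧ sumd Ev ≤ List.foldl max 0 (ent Ev) := by
  intro Ev
  induction Ev using List.reverseRecOn with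
  | nil =>
      intro _ _
      constructor
      · simp [ent, sumd]
      · simp [ent, sumd]
  | append_singleton Ev ev ih =>
      intro hp hd
      obtain ⟨hpE, -, hall'⟩ := List.pairwise_append.mp hp
      have hall : ∀ p ∈ Ev, lexle p ev := fun p hp' => hall' p hp' ev (by simp)
      have hdE : ∀ e ∈ Ev, e.2 = 1 ∨ e.2 = -1 := fun e he => hd e (by simp [he])
      obtain ⟨ih1, ih2⟩ := ih hpE hdE
      obtain ⟨t, d⟩ := ev
      rw [List.foldl_append, ih1]
      simp only [List.foldl_cons, List.foldl_nil, sstep]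
      rcases hd (t, d) (by simp) with h1 | h1 <;> simp only at h1 <;> subst h1
      · -- d = 1 : a start event
        have hsum : sumd (Ev ++ [(t, 1)]) = sumd Ev + 1 := by
          rw [sumd_append]; norm_num
        have hle : ∀ p ∈ Ev ++ [(t, 1)], p.1 ≤ t := by
          intro p hp'
          rcases List.mem_append.mp hp' with hpe | hpe
          · have := hall p hpe; unfold lexle at this; simp only at this; omega
          · simp at hpe; simp [hpe]
        have hggt : gg (Ev ++ [(t, 1)]) t = sumd Ev + 1 := by
          rw [gg_all_le _ _ hle, hsum]
        have hment : sumd Ev + 1 ∈ ent (Ev ++ [(t, 1)]) := by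
          have : gg (Ev ++ [(t, 1)]) (((t, (1 : Int))).1) ∈ ent (Ev ++ [(t, 1)]) :=
            List.mem_map_of_mem (List.mem_filter.mpr ⟨by simp, by simp⟩)
          simpa [hggt] using this
        have hub : List.foldl max 0 (ent (Ev ++ [(t, 1)]))
            ≤ max (List.foldl max 0 (ent Ev)) (sumd Ev + 1) := by
          rcases PySem.List.foldl_max_mem (ent (Ev ++ [(t, 1)])) 0 with h0 | hm
          · rw [h0]
            exact le_max_of_le_left ((PySem.List.le_foldl_max (ent Ev) 0).1)
          · obtain ⟨ev', hev', heq⟩ := List.mem_map.mp hm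
            obtain ⟨hevm, hst⟩ := List.mem_filter.mp hev'
            have hst' : ev'.2 = 1 := by simpa using hst
            rw [← heq]
            rcases List.mem_append.mp hevm with hevE | hevE
            · have hlp := hall ev' hevE
              unfold lexle at hlp; simp only at hlp
              by_cases hu : ev'.1 = t
              · rw [hu, hggt]; exact le_max_right _ _
              · have hut : ev'.1 < t := by omega
                have heq2 : gg (Ev ++ [(t, 1)]) ev'.1 = gg Ev ev'.1 := by
                  rw [gg_append_start, if_neg (not_le.mpr hut)]
                  omega
                rw [heq2]
                exact le_max_of_le_left
                  (ent_mem_le Ev (List.mem_map_of_mem (List.mem_filter.mpr ⟨hevE, hst⟩)))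
            · simp only [List.mem_singleton] at hevE
              have heq3 : gg (Ev ++ [(t, 1)]) ev'.1 = sumd Ev + 1 := by
                rw [hevE]; exact hggt
              rw [heq3]
              exact le_max_right _ _
        have hlb : max (List.foldl max 0 (ent Ev)) (sumd Ev + 1)
            ≤ List.foldl max 0 (ent (Ev ++ [(t, 1)])) := by
          apply max_le
          · rcases PySem.List.foldl_max_mem (ent Ev) 0 with h0 | hm
            · rw [h0]; exact (PySem.List.le_foldl_max _ 0).1
            · obtain ⟨ev', hev', heq⟩ := List.mem_map.mp hm
              obtain ⟨hevE, hst⟩ := List.mem_filter.mp hev'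
              rw [← heq]
              have hmono : gg Ev ev'.1 ≤ gg (Ev ++ [(t, 1)]) ev'.1 := by
                rw [gg_append_start]
                split_ifs <;> omega
              refine le_trans hmono (ent_mem_le _ ?_)
              exact List.mem_map_of_mem (List.mem_filter.mpr ⟨List.mem_append_left _ hevE, hst⟩)
          · exact ent_mem_le _ hment
        refine ⟨?_, ?_⟩
        · rw [Prod.mk.injEq]
          exact ⟨le_antisymm hlb hub, hsum.symm⟩
        · rw [hsum]
          exact (PySem.List.le_foldl_max _ 0).2 _ hment
      · -- d = -1 : an end event
        have hsum : sumd (Ev ++ [(t, -1)]) = sumd Ev - 1 := by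
          rw [sumd_append]; norm_num
        have hstart_lt : ∀ p ∈ Ev, p.2 = 1 → p.1 < t := by
          intro p hpe hp1
          have := hall p hpe; unfold lexle at this; simp only at this; omega
        have hent : ent (Ev ++ [(t, -1)]) = ent Ev := by
          unfold ent
          rw [List.filter_append]
          have hf : List.filter (fun ev => ev.2 == 1) [((t : Int), (-1 : Int))] = [] := by
            simp
          rw [hf, List.append_nil]
          refine List.map_congr_left ?_
          intro ev' hev'
          obtain ⟨hevE, hst⟩ := List.mem_filter.mp hev'
          have hst' : ev'.2 = 1 := by simpa using hst
          have hut : ev'.1 < t := hstart_lt ev' hevE hst'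
          rw [gg_append_end, if_neg (not_le.mpr hut)]
          omega
        refine ⟨?_, ?_⟩
        · rw [Prod.mk.injEq, hent, hsum]
          constructor
          · have : sumd Ev + (-1) ≤ List.foldl max 0 (ent Ev) := by omega
            omega
          · omega
        · rw [hent, hsum]
          omega

lemma max0_le_max0 (L1 L2 : List Int) (h : ∀ x ∈ L1, ∃ y ∈ L2, x ≤ y) :
    List.foldl max 0 L1 ≤ List.foldl max 0 L2 := by
  rcases PySem.List.foldl_max_mem L1 0 with h0 | hm
  · rw [h0]; exact (PySem.List.le_foldl_max L2 0).1
  · obtain ⟨y, hy, hxy⟩ := h _ hm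
    exact le_trans hxy ((PySem.List.le_foldl_max L2 0).2 y hy)

lemma cnt_mono (E : List Int) {u v : Int} (h : u ≤ v) :
    E.countP (fun x => decide (x ≤ u)) ≤ E.countP (fun x => decide (x ≤ v)) :=
  List.countP_mono_left (fun x _ hx => by
    simp only [decide_eq_true_eq] at hx ⊢
    exact le_trans hx h)

lemma sorted_getElem_le_iff : ∀ (E : List Int), E.Pairwise (· ≤ ·) →
    ∀ (i : Nat) (h : i < E.length) (s : Int),
      (E[i] ≤ s ↔ i < E.countP (fun x => decide (x ≤ s))) := by
  intro E
  induction E with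
  | nil => intro _ i h; simp at h
  | cons x E ih =>
      intro hp i h s
      obtain ⟨hx, hpE⟩ := List.pairwise_cons.mp hp
      rw [List.countP_cons]
      by_cases hxs : x ≤ s
      · simp only [hxs, decide_true, if_pos]
        cases i with
        | zero =>
            simp only [List.getElem_cons_zero]
            constructor
            · intro _; omega
            · intro _; exact hxs
        | succ i =>
            simp only [List.getElem_cons_succ]
            rw [ih hpE i (by simpa using h) s]
            omega
      · have hz : E.countP (fun x => decide (x ≤ s)) = 0 :=
          List.countP_eq_zero.mpr (fun a ha => by
            simp only [decide_eq_true_eq]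
            exact not_le.mpr (lt_of_lt_of_le (not_le.mp hxs) (hx a ha)))
        simp only [hxs, decide_false, Bool.false_eq_true, if_neg, not_false_eq_true, hz]
        cases i with
        | zero =>
            simp only [List.getElem_cons_zero]
            constructor
            · intro hcon; exact absurd hcon hxs
            · intro hcon; omega
        | succ i =>
            simp only [List.getElem_cons_succ]
            rw [ih hpE i (by simpa using h) s, hz]
            omega

lemma aLoop_eq (E : List Int) (hE : E.Pairwise (· ≤ ·)) :
    ∀ (S : List Int) (r i : Nat), S.Pairwise (· ≤ ·) → i + S.length ≤ E.length →
    (∀ s ∈ S, i ≤ E.countP (fun x => decide (x ≤ s))) →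
    aLoop E S (r : Int) (i : Int) =
      List.foldl max (r : Int)
        ((S.zipIdx (r + i)).map (fun p => ((p.2 : Int) + 1) - cI E p.1)) := by
  intro S
  induction S with
  | nil => intro r i _ _ _; simp [aLoop]
  | cons s S ih =>
      intro r i hS hlen hcnt
      obtain ⟨hhead, hSt⟩ := List.pairwise_cons.mp hS
      have hi : i < E.length := by simp at hlen; omega
      have hget : PySem.List.pyGetD E (i : Int) 0 = E[i] := by
        rw [PySem.List.pyGetD_natCast, List.getD_eq_getElem E 0 hi]
      have hiff := sorted_getElem_le_iff E hE i hi s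
      have hic : i ≤ E.countP (fun x => decide (x ≤ s)) := hcnt s (by simp)
      simp only [aLoop, hget, List.zipIdx_cons, List.map_cons, List.foldl_cons]
      by_cases hlt : s < E[i]
      · have hceq : E.countP (fun x => decide (x ≤ s)) = i := by
          have hni : ¬ (E[i] ≤ s) := not_le.mpr hlt
          have := hiff
          omega
        rw [if_pos hlt]
        have hmax : max (r : Int) (((r + i : Nat) : Int) + 1 - cI E s) = ((r + 1 : Nat) : Int) := by
          unfold cI
          rw [hceq]
          push_cast
          omega
        rw [hmax]
        have hcast : ((r : Int) + 1) = ((r + 1 : Nat) : Int) := by push_cast; ring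
        have hrec := ih (r + 1) i hSt (by simp at hlen ⊢; omega)
          (fun s' hs' => by
            rw [← hceq]
            exact cnt_mono E (hhead s' hs'))
        rw [Nat.add_right_comm r 1 i] at hrec
        rw [hcast, hrec]
      · rw [if_neg hlt]
        have hic2 : i + 1 ≤ E.countP (fun x => decide (x ≤ s)) := hiff.mp (not_lt.mp hlt)
        have hmax : max (r : Int) (((r + i : Nat) : Int) + 1 - cI E s) = (r : Int) := by
          unfold cI
          push_cast
          omega
        rw [hmax]
        have hcast : ((i : Int) + 1) = ((i + 1 : Nat) : Int) := by push_cast; ring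
        have hrec := ih r (i + 1) hSt (by simp at hlen ⊢; omega)
          (fun s' hs' => le_trans hic2 (cnt_mono E (hhead s' hs')))
        rw [show r + (i + 1) = r + i + 1 from by omega] at hrec
        rw [hcast, hrec]

lemma bridge (meetings : List (Int × Int)) :
    List.foldl max 0
        (((PySem.List.sorted (meetings.map (fun m => m.1)) (fun x => x) false).zipIdx 0).map
          (fun p => ((p.2 : Int) + 1)
            - cI (PySem.List.sorted (meetings.map (fun m => m.2)) (fun x => x) false) p.1))
      = MB meetings := by
  set S := PySem.List.sorted (meetings.map (fun m => m.1)) (fun x => x) false with hSdef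
  set E := PySem.List.sorted (meetings.map (fun m => m.2)) (fun x => x) false with hEdef
  have hS : S.Pairwise (· ≤ ·) := by
    simpa using PySem.List.sorted_pairwise (meetings.map (fun m => m.1)) (fun x => x)
  have hcS : ∀ t, cI S t = cI (meetings.map (fun m => m.1)) t := fun t => by
    unfold cI
    exact congrArg _ (List.Perm.countP_eq _ (PySem.List.sorted_perm _ _ _))
  have hcE : ∀ t, cI E t = cI (meetings.map (fun m => m.2)) t := fun t => by
    unfold cI
    exact congrArg _ (List.Perm.countP_eq _ (PySem.List.sorted_perm _ _ _))
  unfold MB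
  apply le_antisymm
  · apply max0_le_max0
    intro x hx
    obtain ⟨p, hp, hpx⟩ := List.mem_map.mp hx
    obtain ⟨u, k⟩ := p
    obtain ⟨-, hklt, hu⟩ := List.mem_zipIdx hp
    simp only [Nat.zero_add, Nat.sub_zero] at hklt hu
    have hklen : k < S.length := hklt
    have hkc : k < S.countP (fun x => decide (x ≤ u)) :=
      (sorted_getElem_le_iff S hS k hklen u).mp (le_of_eq hu.symm)
    have huS : u ∈ S := hu ▸ List.getElem_mem hklen
    obtain ⟨m, hm, hmu⟩ := List.mem_map.mp ((PySem.List.mem_sorted _ _ _ _).mp huS)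
    refine ⟨fB meetings m.1, List.mem_map_of_mem hm, ?_⟩
    rw [← hpx, hmu]
    unfold fB
    rw [← hcS, ← hcE]
    have hSc : ((k : Int) + 1) ≤ cI S u := by
      unfold cI; omega
    have := hSc
    simp only at this ⊢
    omega
  · apply max0_le_max0
    intro y hy
    obtain ⟨m, hm, hmy⟩ := List.mem_map.mp hy
    have htS : m.1 ∈ S := (PySem.List.mem_sorted _ _ _ _).mpr (List.mem_map_of_mem hm)
    have hcpos : 0 < S.countP (fun x => decide (x ≤ m.1)) :=
      List.countP_pos_iff.mpr ⟨m.1, htS, by simp⟩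
    have hcle : S.countP (fun x => decide (x ≤ m.1)) ≤ S.length := List.countP_le_length
    set c := S.countP (fun x => decide (x ≤ m.1)) with hc
    have hklen : c - 1 < S.length := by omega
    have hmem : ((S[c-1]'hklen, c - 1) : Int × Nat) ∈ S.zipIdx 0 := by
      have hlt : c - 1 < (S.zipIdx 0).length := by rw [List.length_zipIdx]; exact hklen
      have h1 : (S.zipIdx 0)[c-1] = (S[c-1]'hklen, 0 + (c - 1)) := List.getElem_zipIdx hlt
      have h2 := List.getElem_mem hlt
      rw [h1] at h2
      simpa using h2
    refine ⟨((c - 1 : Nat) : Int) + 1 - cI E (S[c-1]'hklen), List.mem_map_of_mem hmem, ?_⟩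
    have hSkt : S[c-1]'hklen ≤ m.1 :=
      (sorted_getElem_le_iff S hS (c - 1) hklen m.1).mpr (by omega)
    have hmono : cI E (S[c-1]'hklen) ≤ cI E m.1 := by
      unfold cI
      exact_mod_cast cnt_mono E hSkt
    rw [← hmy]
    unfold fB
    rw [← hcS, ← hcE]
    have hSc : cI S m.1 = (c : Int) := by unfold cI; rw [← hc]
    rw [hSc]
    omega

lemma A_eq_MB (meetings : List (Int × Int)) : find_min_rooms_end_delta meetings = MB meetings := by
  by_cases hnil : meetings = []
  · subst hnil
    simp [find_min_rooms_end_delta, MB]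
  · have hlen : ¬ (0 = meetings.length) := by
      intro h
      exact hnil (List.eq_nil_of_length_eq_zero h.symm)
    simp only [find_min_rooms_end_delta, if_neg hlen,
      PySem.List.foldl_append_singleton_eq_map, List.nil_append]
    set S := PySem.List.sorted (meetings.map (fun intv => intv.1)) (fun x => x) false with hSdef
    set E := PySem.List.sorted (meetings.map (fun intv => intv.2)) (fun x => x) false with hEdef
    have hS : S.Pairwise (· ≤ ·) := by
      simpa using PySem.List.sorted_pairwise (meetings.map (fun intv => intv.1)) (fun x => x)
    have hE : E.Pairwise (· ≤ ·) := by
      simpa using PySem.List.sorted_pairwise (meetings.map (fun intv => intv.2)) (fun x => x)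
    have hlenSE : (0 : Nat) + S.length ≤ E.length := by
      rw [hSdef, hEdef, PySem.List.length_sorted, PySem.List.length_sorted,
        List.length_map, List.length_map]
      omega
    have h0 := aLoop_eq E hE S 0 0 hS hlenSE (fun s _ => Nat.zero_le _)
    simp only [Nat.cast_zero, Nat.add_zero] at h0
    rw [h0]
    exact bridge meetings

lemma count_evOf_start (ms : List (Int × Int)) (u : Int) :
    (evOf ms).countP (fun ev => ev.2 == 1 && decide (ev.1 ≤ u))
      = ms.countP (fun m => decide (m.1 ≤ u)) := by
  induction ms with
  | nil => rfl
  | cons m ms ih =>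
      unfold evOf at ih ⊢
      rw [List.flatMap_cons, List.countP_append, ih, List.countP_cons]
      simp only [List.countP_cons, List.countP_nil]
      by_cases h : m.1 ≤ u <;> simp [h] <;> omega

lemma count_evOf_end (ms : List (Int × Int)) (u : Int) :
    (evOf ms).countP (fun ev => ev.2 == -1 && decide (ev.1 ≤ u))
      = ms.countP (fun m => decide (m.2 ≤ u)) := by
  induction ms with
  | nil => rfl
  | cons m ms ih =>
      unfold evOf at ih ⊢
      rw [List.flatMap_cons, List.countP_append, ih, List.countP_cons]
      simp only [List.countP_cons, List.countP_nil]
      by_cases h : m.2 ≤ u <;> simp [h] <;> omega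

lemma B_eq_MB (meetings : List (Int × Int)) : find_min_rooms_end_delta_alt meetings = MB meetings := by
  simp only [find_min_rooms_end_delta_alt]
  have hfold : List.foldl (fun acc p => acc ++ [(p.1, (1 : Int)), (p.2, (-1 : Int))]) [] meetings
      = evOf meetings := by
    have h := PySem.List.foldl_append_eq_flatMap
      (fun p => [(p.1, (1 : Int)), (p.2, (-1 : Int))]) meetings []
    simpa [evOf] using h
  rw [hfold]
  set X := PySem.List.sorted (evOf meetings) (fun ev => ev.2) false with hXdef
  set Ev := PySem.List.sorted X (fun ev => ev.1) false with hEvdef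
  have hpX : X.Pairwise (fun a b => a.2 ≤ b.2) := by
    simpa using PySem.List.sorted_pairwise (evOf meetings) (fun ev => ev.2)
  have hpEv : Ev.Pairwise lexle := by
    rw [hEvdef, PySem.List.sorted_eq_foldl_insertBy]
    exact foldl_insertBy_lexle X [] hpX (by simp) (by simp)
  have hperm : Ev.Perm (evOf meetings) :=
    (PySem.List.sorted_perm X (fun ev => ev.1) false).trans
      (PySem.List.sorted_perm (evOf meetings) (fun ev => ev.2) false)
  have hd : ∀ ev ∈ Ev, ev.2 = 1 ∨ ev.2 = -1 := by
    intro ev hev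
    have hmem : ev ∈ evOf meetings := hperm.mem_iff.mp hev
    obtain ⟨m, hm, h2⟩ := List.mem_flatMap.mp hmem
    rcases (by simpa using h2 : ev = (m.1, (1 : Int)) ∨ ev = (m.2, (-1 : Int))) with h | h <;>
      rw [h] <;> simp
  have hgg : ∀ u, gg Ev u = fB meetings u := by
    intro u
    unfold gg
    rw [List.Perm.countP_eq _ hperm, List.Perm.countP_eq _ hperm,
      count_evOf_start, count_evOf_end]
    unfold fB cI
    rw [List.countP_map, List.countP_map]
    rw [List.countP_congr (fun m _ => by simp : ∀ m ∈ meetings,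
          (((fun x => decide (x ≤ u)) ∘ fun m => m.1) m = true ↔ (fun m => decide (m.1 ≤ u)) m = true)),
        List.countP_congr (fun m _ => by simp : ∀ m ∈ meetings,
          (((fun x => decide (x ≤ u)) ∘ fun m => m.2) m = true ↔ (fun m => decide (m.2 ≤ u)) m = true))]
  rw [bSweep_eq_foldl, (sweep_invariant Ev hpEv hd).1]
  show List.foldl max 0 (ent Ev) = MB meetings
  unfold MB
  apply le_antisymm
  · apply max0_le_max0
    intro x hx
    obtain ⟨ev, hev, hevx⟩ := List.mem_map.mp hx
    obtain ⟨hevEv, hst⟩ := List.mem_filter.mp hev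
    have hst' : ev.2 = 1 := by simpa using hst
    have hmem : ev ∈ evOf meetings := hperm.mem_iff.mp hevEv
    obtain ⟨m, hm, h2⟩ := List.mem_flatMap.mp hmem
    have hm1 : ev.1 = m.1 := by
      rcases (by simpa using h2 : ev = (m.1, (1 : Int)) ∨ ev = (m.2, (-1 : Int))) with h | h
      · rw [h]
      · rw [h] at hst'; simp at hst'
    refine ⟨fB meetings m.1, List.mem_map_of_mem hm, ?_⟩
    have hxeq : x = fB meetings m.1 := by
      simp only [← hevx, hgg, hm1]
    exact le_of_eq hxeq
  · apply max0_le_max0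
    intro y hy
    obtain ⟨m, hm, hmy⟩ := List.mem_map.mp hy
    have hevm : ((m.1, (1 : Int)) : Int × Int) ∈ Ev :=
      hperm.mem_iff.mpr (List.mem_flatMap.mpr ⟨m, hm, by simp⟩)
    have hmem : gg Ev m.1 ∈ ent Ev := by
      have h1 : ((m.1, (1 : Int)) : Int × Int) ∈ Ev.filter (fun ev => ev.2 == 1) :=
        List.mem_filter.mpr ⟨hevm, by simp⟩
      have h2 := List.mem_map_of_mem (f := fun ev => gg Ev ev.1) h1
      simpa [ent] using h2
    exact ⟨gg Ev m.1, hmem, by rw [hgg, ← hmy]⟩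

-- ===== VERDICT (by name: the statement is the Claim_ definition above) =====
theorem find_min_rooms_end_delta_spec : Claim_equal_find_min_rooms_end_delta := by
  intro meetings _
  unfold Spec_find_min_rooms_end_delta
  rw [A_eq_MB, B_eq_MB]
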